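-- pv_equiv track=rewrite | github.com/ibicso/album_cover_complexity | dataset/genre_cleaner.py | map_genres
-- ===== SOURCE A (Python) =====
-- from typing import List, Dict, Any
--
-- def map_genres(genres: List[str], genre_mapping: Dict[str, str]) -> List[str]:
--     """
--     Map a list of genres to their corresponding target genres.
--
--     Args:
--         genres: List of original genre names
--         genre_mapping: Mapping dictionary
--
--     Returns:
--         List of mapped genre names (duplicates removed)
--     """
--     mapped_genres = []
--
--     for genre in genres:
--         if genre in genre_mapping:
--             mapped_genre = genre_mapping[genre]
--             if mapped_genre not in mapped_genres:
--                 mapped_genres.append(mapped_genre)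
--         else:
--             # If genre is not in mapping, keep original
--             if genre not in mapped_genres:
--                 mapped_genres.append(genre)
--
--     return mapped_genres
-- ===== SOURCE B (Python) =====
-- def map_genres(genres, genre_mapping):
--     # Three staged passes, no membership test against the growing output:
--     # 1) map every genre; 2) index the first occurrence position of each mapped
--     # value; 3) keep exactly the positions that ARE the first occurrence.
--     mapped = [genre_mapping.get(g, g) for g in genres]
--     first = {}
--     for i, v in enumerate(mapped):
--         if v not in first:
--             first[v] = i
--     return [v for i, v in enumerate(mapped) if first.get(v) == i]
-- ===== Notes on version B (the rewrite author's own statement) =====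
-- stated objective: faster
-- what changed: Replaces A's single interleaved loop that tests membership against the growing output list with three staged passes: map all genres, build a first-occurrence position index, then keep each element exactly when its position equals its value's first-occurrence index.
import Mathlib
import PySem

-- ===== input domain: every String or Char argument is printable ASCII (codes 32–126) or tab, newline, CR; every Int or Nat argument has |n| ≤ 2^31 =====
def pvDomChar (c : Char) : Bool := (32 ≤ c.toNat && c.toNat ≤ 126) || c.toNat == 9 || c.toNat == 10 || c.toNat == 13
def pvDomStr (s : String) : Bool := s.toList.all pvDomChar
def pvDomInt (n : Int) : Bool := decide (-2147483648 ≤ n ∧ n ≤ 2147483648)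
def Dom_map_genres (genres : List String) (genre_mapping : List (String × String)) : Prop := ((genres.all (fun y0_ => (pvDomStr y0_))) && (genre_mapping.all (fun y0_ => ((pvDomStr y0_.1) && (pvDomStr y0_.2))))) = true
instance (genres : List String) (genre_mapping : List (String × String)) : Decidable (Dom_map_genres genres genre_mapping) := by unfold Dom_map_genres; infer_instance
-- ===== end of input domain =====

-- B replaces A's interleaved map-and-dedup loop by three staged passes (map all, index first occurrences, filter by first-occurrence position); faster on duplicate-heavy lists by removing the scan of the growing output.


-- ===== PORT A =====
-- the Python dict parameter, built from the association list (shared by both ports)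
def mgDict (genre_mapping : List (String × String)) : PySem.Dict String String :=
  PySem.Dict.ofList genre_mapping

def map_genres (genres : List String) (genre_mapping : List (String × String)) : List String :=
  genres.foldl (fun mapped_genres genre =>
    match (mgDict genre_mapping).get? genre with
    | some mapped_genre =>
        if mapped_genre ∈ mapped_genres then mapped_genres else mapped_genres ++ [mapped_genre]
    | none =>
        if genre ∈ mapped_genres then mapped_genres else mapped_genres ++ [genre]) []

-- ===== PORT B =====
-- pass 2 of Source B: the dict 'first' mapping each value to the index of its first occurrence
def mgFirst (mapped : List String) : PySem.Dict String Int :=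
  (PySem.List.enumerate mapped 0).foldl
    (fun first iv => if first.contains iv.2 then first else first.insert iv.2 iv.1)
    PySem.Dict.empty

def map_genres_alt (genres : List String) (genre_mapping : List (String × String)) : List String :=
  let mapped := genres.map (fun g => (mgDict genre_mapping).getD g g)
  let first := mgFirst mapped
  -- pass 3: 'first.get(v) == i' — get? returns an Option, compared against some i
  ((PySem.List.enumerate mapped 0).filter (fun iv => first.get? iv.2 == some iv.1)).map (fun iv => iv.2)

-- ===== PRECONDITION & SPEC =====
def Spec_map_genres (genres : List String) (genre_mapping : List (String × String)) (out : List String) : Prop := out = map_genres_alt genres genre_mapping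
instance (genres : List String) (genre_mapping : List (String × String)) (out : List String) : Decidable (Spec_map_genres genres genre_mapping out) := by unfold Spec_map_genres; infer_instance

-- ===== CLAIM (what is proved, stated in full; the proofs are below) =====
def Claim_equal_map_genres : Prop := ∀ (genres : List String) (genre_mapping : List (String × String)), Dom_map_genres genres genre_mapping → Spec_map_genres genres genre_mapping (map_genres genres genre_mapping)

-- ===== LEMMAS AND PROOFS =====

-- A's loop body is exactly one Set.add of the looked-up value
lemma mg_step_eq (d : PySem.Dict String String) (acc : List String) (g : String) :
    (match d.get? g with
     | some m => if m ∈ acc then acc else acc ++ [m]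
     | none => if g ∈ acc then acc else acc ++ [g])
    = PySem.Set.add acc (d.getD g g) := by
  rw [PySem.Set.add_eq_ite]
  cases h : d.get? g <;> simp [PySem.Dict.getD, h]

-- so A computes the ordered dedup of the mapped list
lemma map_genres_eq_dedup (genres : List String) (genre_mapping : List (String × String)) :
    map_genres genres genre_mapping
      = PySem.List.dedup (genres.map (fun g => (mgDict genre_mapping).getD g g)) := by
  unfold map_genres
  rw [PySem.List.dedup_eq_ofList, PySem.Set.ofList_eq_foldl, List.foldl_map]
  congr 1
  funext acc g
  exact mg_step_eq _ acc g

-- an index returned by idxOf? is an index into the list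
lemma idxOf?_lt_length {α : Type} [BEq α] (l : List α) (v : α) (j : Nat)
    (h : List.idxOf? v l = some j) : j < l.length := by
  induction l generalizing j with
  | nil => simp [List.idxOf?] at h
  | cons a t ih =>
      rw [List.idxOf?_cons] at h
      by_cases ha : (a == v) = true
      · simp [ha] at h
        simp [← h]
      · simp [ha] at h
        obtain ⟨k, hk, rfl⟩ := h
        have := ih k hk
        simp
        omega

-- idxOf? over an appended singleton: the left list wins, else the new last index
lemma idxOf?_append_singleton {α : Type} [BEq α] (t : List α) (x v : α) :
    List.idxOf? v (t ++ [x])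
      = match List.idxOf? v t with
        | some j => some j
        | none => if (x == v) = true then some t.length else none := by
  induction t with
  | nil => simp [List.idxOf?]
  | cons a u ih =>
      simp only [List.cons_append, List.idxOf?_cons, ih]
      by_cases ha : (a == v) = true
      · simp [ha]
      · simp only [ha, Bool.false_eq_true, if_false]
        cases h : List.idxOf? v u with
        | some j => rfl
        | none =>
            by_cases hx : (x == v) = true <;> simp [hx]

-- shifting the start across a cons whose head is not the searched value
lemma idxOf?_cons_shift (a v : String) (t : List String) (s : Int) (hav : a ≠ v) :
    (List.idxOf? v (a :: t)).map (fun n : Nat => s + (n : Int))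
      = (List.idxOf? v t).map (fun n : Nat => (s + 1) + (n : Int)) := by
  have hba : (a == v) = false := by simp [hav]
  rw [List.idxOf?_cons]
  simp only [hba, Bool.false_eq_true, if_false, Option.map_map]
  cases h : List.idxOf? v t
  · simp
  · simp; ring

-- the first-occurrence dict built by B's setdefault-style loop, characterised by idxOf?
lemma mgFirst_fold_get? (l : List String) : ∀ (s : Int) (d : PySem.Dict String Int) (v : String),
    ((PySem.List.enumerate l s).foldl
      (fun first iv => if first.contains iv.2 then first else first.insert iv.2 iv.1) d).get? v
    = if d.contains v then d.get? v
      else (List.idxOf? v l).map (fun n : Nat => s + (n : Int)) := by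
  induction l with
  | nil =>
      intro s d v
      have hnil : List.idxOf? v ([] : List String) = none := rfl
      simp only [PySem.List.enumerate_nil, List.foldl_nil, hnil]
      by_cases hv : d.contains v = true
      · simp [hv]
      · simp [hv, (PySem.Dict.get?_eq_none_iff_contains d v).2 (by simpa using hv)]
  | cons a t ih =>
      intro s d v
      rw [PySem.List.enumerate_cons]
      simp only [List.foldl_cons]
      by_cases hc : d.contains a = true
      · rw [if_pos hc, ih]
        by_cases hv : d.contains v = true
        · simp [hv]
        · have hav : a ≠ v := by rintro rfl; exact hv hc
          simp only [hv, Bool.false_eq_true, if_false]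
          exact (idxOf?_cons_shift a v t s hav).symm
      · rw [if_neg hc, ih]
        by_cases hav : a = v
        · subst hav
          have h0 : List.idxOf? a (a :: t) = some 0 := by simp [List.idxOf?_cons]
          simp [PySem.Dict.get?_insert_self, hc, h0]
        · have hne : v ≠ a := fun h => hav h.symm
          rw [PySem.Dict.get?_insert_of_ne _ _ hne]
          have hvb : (v == a) = false := by simp [hne]
          simp only [PySem.Dict.contains_insert, hvb, Bool.false_or]
          by_cases hv : d.contains v = true
          · simp [hv]
          · simp only [hv, Bool.false_eq_true, if_false]
            exact (idxOf?_cons_shift a v t s hav).symm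

lemma mgFirst_get? (l : List String) (v : String) :
    (mgFirst l).get? v = (List.idxOf? v l).map (fun n : Nat => (n : Int)) := by
  unfold mgFirst
  rw [mgFirst_fold_get? l 0 PySem.Dict.empty v]
  simp [PySem.Dict.contains_empty]

-- the staged filter of B equals the ordered dedup, by reverse induction on the list
lemma dedup_eq_first_filter (l : List String) :
    PySem.List.dedup l
      = ((PySem.List.enumerate l 0).filter (fun iv => (mgFirst l).get? iv.2 == some iv.1)).map
          (fun iv => iv.2) := by
  induction l using List.reverseRecOn with
  | nil => rfl
  | append_singleton t x ih =>
      have henum : PySem.List.enumerate (t ++ [x]) 0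
          = PySem.List.enumerate t 0 ++ [((t.length : Int), x)] := by
        rw [PySem.List.enumerate_append]; simp [PySem.List.enumerate_cons]
      have hfilter_pref :
          (PySem.List.enumerate t 0).filter (fun iv => (mgFirst (t ++ [x])).get? iv.2 == some iv.1)
          = (PySem.List.enumerate t 0).filter (fun iv => (mgFirst t).get? iv.2 == some iv.1) := by
        apply List.filter_congr
        intro iv hm
        obtain ⟨k, hk, rfl⟩ := (PySem.List.mem_enumerate_iff _ _ _).1 hm
        have hmem : t[k] ∈ t := List.getElem_mem hk
        rw [mgFirst_get?, mgFirst_get?, idxOf?_append_singleton]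
        cases h : List.idxOf? t[k] t with
        | none => exact absurd (List.idxOf?_eq_none_iff.1 h) (by simp [hmem])
        | some j => rfl
      have hdedup : PySem.List.dedup (t ++ [x]) = PySem.Set.add (PySem.List.dedup t) x := by
        simp [PySem.List.dedup_eq_ofList, PySem.Set.ofList_eq_foldl, List.foldl_append]
      by_cases hx : x ∈ t
      · -- x already occurs: the new pair fails the first-occurrence test, nothing is added
        have hadd : PySem.Set.add (PySem.List.dedup t) x = PySem.List.dedup t := by
          rw [PySem.Set.add_eq_ite]; simp [hx]
        have hlast : ((mgFirst (t ++ [x])).get? x == some (t.length : Int)) = false := by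
          rw [mgFirst_get?, idxOf?_append_singleton]
          cases h : List.idxOf? x t with
          | none => exact absurd (List.idxOf?_eq_none_iff.1 h) (by simp [hx])
          | some j =>
              have hj := idxOf?_lt_length t x j h
              simp
              omega
        rw [hdedup, hadd, ih, henum, List.filter_append]
        simp [hlast, hfilter_pref]
      · -- x is new: the new pair passes the test and is appended
        have hadd : PySem.Set.add (PySem.List.dedup t) x = PySem.List.dedup t ++ [x] := by
          rw [PySem.Set.add_eq_ite]; simp [hx]
        have hlast : ((mgFirst (t ++ [x])).get? x == some (t.length : Int)) = true := by
          rw [mgFirst_get?, idxOf?_append_singleton]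
          have h : List.idxOf? x t = none := List.idxOf?_eq_none_iff.2 (by simp [hx])
          rw [h]
          simp
        rw [hdedup, hadd, ih, henum, List.filter_append]
        simp [hlast, hfilter_pref]

-- ===== VERDICT (by name: the statement is the Claim_ definition above) =====
theorem map_genres_spec : Claim_equal_map_genres := by
  intro genres genre_mapping _
  unfold Spec_map_genres map_genres_alt
  rw [map_genres_eq_dedup]
  exact dedup_eq_first_filter _
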